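-- pv_equiv track=rewrite | github.com/NguyenVuHoaBinh/HW_BigO | BigO.py | hw4
-- ===== SOURCE A (Python) =====
-- import collections
--
-- def hw4(array):
--     dict = {}                                               #O(1)
--     for i in range(len(array)):                             #O(n)
--         if(array[i] not in dict):                           #O(1)
--             dict[array[i]] = 1                              #O(1)
--         else:
--             dict[array[i]] += 1                             #O(1)
--     return collections.OrderedDict(sorted(dict.items()))    #O(1)
-- ===== SOURCE B (Python) =====
-- import collections
--
-- def hw4(array):
--     # Sort first, then one run-length pass over consecutive equal elements.
--     s = sorted(array)
--     out = collections.OrderedDict()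
--     i = 0
--     n = len(s)
--     while i < n:
--         v = s[i]
--         j = i + 1
--         while j < n and s[j] == v:
--             j += 1
--         out[v] = j - i
--         i = j
--     return out
-- ===== Notes on version B (the rewrite author's own statement) =====
-- stated objective: alternative
-- what changed: Replaces A's hash-map counting pass followed by sorting the distinct (key, count) pairs with sorting the input first and then a single run-length pass over consecutive equal elements.
import Mathlib
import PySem

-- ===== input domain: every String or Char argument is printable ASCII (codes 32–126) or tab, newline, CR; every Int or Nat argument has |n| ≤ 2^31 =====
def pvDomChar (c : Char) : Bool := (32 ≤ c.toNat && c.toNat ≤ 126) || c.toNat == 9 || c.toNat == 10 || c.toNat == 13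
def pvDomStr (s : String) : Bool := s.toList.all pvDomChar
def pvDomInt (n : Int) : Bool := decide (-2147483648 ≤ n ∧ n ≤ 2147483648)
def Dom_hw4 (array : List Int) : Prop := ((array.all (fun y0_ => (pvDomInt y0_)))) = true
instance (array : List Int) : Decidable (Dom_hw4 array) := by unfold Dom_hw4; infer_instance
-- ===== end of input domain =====

-- B replaces A's hash-map counting pass + sort of the distinct (key, count) pairs by
-- 'sort the input, then one run-length pass over consecutive equal elements' (alternative
-- decomposition, same results; return-value equivalence — both build a fresh dict).

-- ===== PORT A =====
-- dict = {}; for i in range(len(array)): if array[i] not in dict: dict[array[i]] = 1 else: dict[array[i]] += 1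
-- return collections.OrderedDict(sorted(dict.items()))  (items in sorted order; sorted on pairs = tuple lex order)
def hw4 (array : List Int) : List (Int × Int) :=
  let d : PySem.Dict Int Int :=
    (PySem.List.pyRange 0 (PySem.List.len array)).foldl
      (fun d i =>
        let x := PySem.List.pyGetD array i 0    -- array[i], i always in range here
        if d.contains x = false then d.insert x 1
        else d.insert x (d.getD x 0 + 1))       -- dict[array[i]] += 1 (key present in this branch)
      PySem.Dict.empty
  PySem.List.sorted2 d.items (fun p => p.1) (fun p => p.2)

-- ===== PORT B =====
-- s = sorted(array); then scan: v = s[i], advance j over the run of v, emit (v, j - i), continue at j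
def hw4Runs (s : List Int) : List (Int × Int) :=
  match s with
  | [] => []
  | x :: xs =>
    (x, 1 + (xs.takeWhile (fun y => y == x)).length) :: hw4Runs (xs.dropWhile (fun y => y == x))
termination_by s.length
decreasing_by
  exact Nat.lt_succ_of_le (xs.dropWhile_sublist (p := fun y => y == x)).length_le

def hw4_alt (array : List Int) : List (Int × Int) :=
  hw4Runs (PySem.List.sorted array (fun x => x))

-- ===== PRECONDITION & SPEC =====
def Spec_hw4 (array : List Int) (out : List (Int × Int)) : Prop := out = hw4_alt array
instance (array : List Int) (out : List (Int × Int)) : Decidable (Spec_hw4 array out) := by unfold Spec_hw4; infer_instance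

-- ===== CLAIM (what is proved, stated in full; the proofs are below) =====
def Claim_equal_hw4 : Prop := ∀ (array : List Int), Dom_hw4 array → Spec_hw4 array (hw4 array)

-- ===== LEMMAS AND PROOFS =====

-- insertBy only looks at 'before x ·' on the members of the target list
theorem hw4_insertBy_congr (f g : Int × Int → Int × Int → Bool) (x : Int × Int)
    (ys : List (Int × Int)) (h : ∀ y ∈ ys, f x y = g x y) :
    PySem.List.insertBy f x ys = PySem.List.insertBy g x ys := by
  induction ys with
  | nil => rfl
  | cons y t ih =>
    simp only [PySem.List.insertBy, h y (by simp)]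
    split <;> simp_all

theorem hw4_foldl_insertBy_congr (f g : Int × Int → Int × Int → Bool)
    (l : List (Int × Int)) (acc : List (Int × Int))
    (h : ∀ x ∈ l, ∀ y, (y ∈ acc ∨ y ∈ l) → f x y = g x y) :
    l.foldl (fun a x => PySem.List.insertBy f x a) acc
      = l.foldl (fun a x => PySem.List.insertBy g x a) acc := by
  induction l generalizing acc with
  | nil => rfl
  | cons x t ih =>
    simp only [List.foldl_cons]
    rw [hw4_insertBy_congr f g x acc (fun y hy => h x (by simp) y (Or.inl hy))]
    exact ih _ (fun z hz y hy => h z (by simp [hz]) y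
      (by rcases hy with hy | hy
          · rcases (PySem.List.mem_insertBy g x y acc).1 hy with rfl | hy
            · exact Or.inr (by simp)
            · exact Or.inl hy
          · exact Or.inr (by simp [hy])))

-- with pairwise-distinct first components, Python's tuple sort is the sort by first component
theorem hw4_sorted2_eq_sorted (l : List (Int × Int))
    (hnd : (l.map Prod.fst).Nodup) :
    PySem.List.sorted2 l (fun p => p.1) (fun p => p.2)
      = PySem.List.sorted l (fun p => p.1) := by
  rw [PySem.List.sorted_eq_foldl_insertBy]
  show l.foldl (fun acc x => PySem.List.insertBy _ x acc) [] = _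
  apply hw4_foldl_insertBy_congr
  intro x hx y hy
  rcases hy with hy | hy
  · simp at hy
  · by_cases hxy : x = y
    · subst hxy; simp
    · have hne : x.1 ≠ y.1 := fun he => hxy (List.inj_on_of_nodup_map hnd hx hy he)
      rcases lt_trichotomy x.1 y.1 with h1 | h1 | h1
      · simp [h1]
      · exact absurd h1 hne
      · simp [h1, not_lt.2 (le_of_lt h1)]

-- prepending an element absent from the rest of the fold commutes with Set.add folding
theorem hw4_foldl_add_cons (l : List Int) (x : Int) (acc : List Int) (hx : x ∉ l) :
    l.foldl PySem.Set.add (x :: acc) = x :: l.foldl PySem.Set.add acc := by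
  induction l generalizing acc with
  | nil => rfl
  | cons y t ih =>
    have hxy : y ≠ x := fun h => hx (by simp [h])
    have : PySem.Set.add (x :: acc) y = x :: PySem.Set.add acc y := by
      simp [PySem.Set.add, PySem.Set.contains, hxy]
      split <;> simp
    simp only [List.foldl_cons, this]
    exact ih _ (fun hmem => hx (List.mem_cons_of_mem _ hmem))

theorem hw4_ofList_run (x : Int) (run rest : List Int)
    (hrun : ∀ y ∈ run, y = x) (hrest : x ∉ rest) :
    PySem.Set.ofList (x :: (run ++ rest)) = x :: PySem.Set.ofList rest := by
  rw [PySem.Set.ofList_eq_foldl, PySem.Set.ofList_eq_foldl]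
  have h0 : PySem.Set.add [] x = [x] := rfl
  simp only [List.foldl_cons, List.foldl_append, h0]
  have hr : run.foldl PySem.Set.add [x] = [x] := by
    induction run with
    | nil => rfl
    | cons y t ih =>
      have : y = x := hrun y (by simp)
      subst this
      simp only [List.foldl_cons]
      have : PySem.Set.add [y] y = [y] := by simp [PySem.Set.add, PySem.Set.contains]
      rw [this]
      exact ih (fun z hz => hrun z (by simp [hz]))
  rw [hr]
  exact hw4_foldl_add_cons rest x [] hrest

-- on a weakly-increasing list, x's run is an initial segment: x does not reappear after it
theorem hw4_not_mem_dropWhile (x : Int) (xs : List Int) (h : (x :: xs).Pairwise (· ≤ ·)) :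
    x ∉ xs.dropWhile (fun y => y == x) := by
  intro hmem
  have hxle : ∀ y ∈ xs, x ≤ y := (List.pairwise_cons.1 h).1
  have hpw : (xs.dropWhile (fun y => y == x)).Pairwise (· ≤ ·) :=
    List.Pairwise.sublist (List.dropWhile_sublist _) (List.pairwise_cons.1 h).2
  cases hd : xs.dropWhile (fun y => y == x) with
  | nil => rw [hd] at hmem; simp at hmem
  | cons r rs =>
    rw [hd] at hmem hpw
    have hhead := List.head?_dropWhile_not (fun y => y == x) xs
    rw [hd] at hhead
    simp at hhead
    have hrmem : r ∈ xs := List.Sublist.mem (by rw [hd]; exact List.mem_cons_self)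
      (List.dropWhile_sublist _)
    have hxr : x < r := lt_of_le_of_ne (hxle r hrmem) (Ne.symm hhead)
    rcases List.mem_cons.1 hmem with rfl | hmem'
    · exact absurd rfl hhead
    · have : r ≤ x := (List.pairwise_cons.1 hpw).1 x hmem'
      omega

-- the run-length pass over a weakly-increasing list produces (distinct value, multiplicity) pairs
theorem hw4Runs_spec (s : List Int) (h : s.Pairwise (· ≤ ·)) :
    hw4Runs s = (PySem.Set.ofList s).map (fun k => (k, (s.count k : Int))) := by
  induction s using hw4Runs.induct with
  | case1 => simp [hw4Runs]
  | case2 x xs ih =>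
    have hsplit : xs = xs.takeWhile (fun y => y == x) ++ xs.dropWhile (fun y => y == x) :=
      (List.takeWhile_append_dropWhile).symm
    have hrun : ∀ y ∈ xs.takeWhile (fun y => y == x), y = x := by
      intro y hy
      simpa using List.mem_takeWhile_imp hy
    have hrest : x ∉ xs.dropWhile (fun y => y == x) := hw4_not_mem_dropWhile x xs h
    have hrestpw : (xs.dropWhile (fun y => y == x)).Pairwise (· ≤ ·) :=
      List.Pairwise.sublist (List.dropWhile_sublist _) (List.pairwise_cons.1 h).2
    have hofl : PySem.Set.ofList (x :: xs)
        = x :: PySem.Set.ofList (xs.dropWhile (fun y => y == x)) := by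
      conv_lhs => rw [hsplit]
      exact hw4_ofList_run x _ _ hrun hrest
    have hcountx : (x :: xs).count x = 1 + (xs.takeWhile (fun y => y == x)).length := by
      have hcx : xs.count x = (xs.takeWhile (fun y => y == x)).length := by
        conv_lhs => rw [hsplit]
        rw [List.count_append, List.count_eq_zero.2 hrest,
          List.count_eq_length.2 (fun y hy => (hrun y hy).symm)]
        omega
      rw [List.count_cons_self, hcx]
      omega
    have hcountk : ∀ k ∈ PySem.Set.ofList (xs.dropWhile (fun y => y == x)),
        (x :: xs).count k = (xs.dropWhile (fun y => y == x)).count k := by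
      intro k hk
      have hkrest : k ∈ xs.dropWhile (fun y => y == x) := (PySem.Set.mem_ofList _ k).1 hk
      have hkx : k ≠ x := fun h' => hrest (h' ▸ hkrest)
      rw [List.count_cons_of_ne (Ne.symm hkx)]
      conv_lhs => rw [hsplit]
      rw [List.count_append, List.count_eq_zero.2 (fun hmem => hkx (hrun k hmem))]
      omega
    rw [hw4Runs, hofl, List.map_cons, ih hrestpw]
    congr 1
    · rw [hcountx]; push_cast; ring_nf
    · exact (List.map_congr_left (fun k hk => by rw [hcountk k hk])).symm

-- Set.ofList is a sublist (first occurrences in order)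
theorem hw4_ofList_sublist (l : List Int) : (PySem.Set.ofList l).Sublist l := by
  rw [PySem.Set.ofList_eq_foldl]
  suffices h : ∀ (l : List Int) (acc : List Int), ∃ t, l.foldl PySem.Set.add acc = acc ++ t ∧ t.Sublist l by
    obtain ⟨t, ht, hs⟩ := h l []
    simpa [ht] using hs
  intro l
  induction l with
  | nil => exact fun acc => ⟨[], by simp⟩
  | cons x xs ih =>
    intro acc
    by_cases hc : PySem.Set.contains acc x = true
    · obtain ⟨t, ht, hs⟩ := ih acc
      refine ⟨t, ?_, hs.cons x⟩
      simp only [List.foldl_cons, PySem.Set.add, hc, if_true]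
      exact ht
    · obtain ⟨t, ht, hs⟩ := ih (acc ++ [x])
      refine ⟨x :: t, ?_, hs.cons₂ x⟩
      simp only [List.foldl_cons, PySem.Set.add, hc]
      simpa using ht

theorem hw4_counter_loop (array : List Int) :
    (PySem.List.pyRange 0 (PySem.List.len array)).foldl
      (fun d i =>
        let x := PySem.List.pyGetD array i 0
        if d.contains x = false then d.insert x 1
        else d.insert x (d.getD x 0 + 1))
      (PySem.Dict.empty : PySem.Dict Int Int) = PySem.Dict.counter array := by
  have h1 : (PySem.List.pyRange 0 (PySem.List.len array)).foldl
      (fun d i =>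
        let x := PySem.List.pyGetD array i 0
        if d.contains x = false then d.insert x 1
        else d.insert x (d.getD x 0 + 1))
      (PySem.Dict.empty : PySem.Dict Int Int)
      = ((PySem.List.pyRange 0 (PySem.List.len array)).map
          (fun j => PySem.List.pyGetD array j 0)).foldl
          (fun d x => d.insert x (d.getD x 0 + 1)) (PySem.Dict.empty : PySem.Dict Int Int) := by
    rw [List.foldl_map]
    apply PySem.List.foldl_congr_mem
    intro d i _
    by_cases hc : d.contains (PySem.List.pyGetD array i 0) = false
    · simp only [hc, if_true]
      rw [PySem.Dict.getD_of_not_contains d _ hc]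
      norm_num
    · simp [hc]
  rw [PySem.List.map_pyGetD_pyRange_zero array 0] at h1
  exact h1.trans (PySem.Dict.foldl_insert_getD_add_one_eq_counter array)

-- ===== VERDICT (by name: the statement is the Claim_ definition above) =====
theorem hw4_spec : Claim_equal_hw4 := by
  intro array _
  show hw4 array = hw4_alt array
  unfold hw4 hw4_alt
  rw [hw4_counter_loop]
  set s := PySem.List.sorted array (fun x => x) with hs
  have hsperm : s.Perm array := PySem.List.sorted_perm array (fun x => x) false
  have hspw : s.Pairwise (· ≤ ·) := PySem.List.sorted_pairwise array (fun x => x)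
  have hitems := PySem.Dict.items_counter array
  have hndk : ((PySem.Dict.counter array).items.map Prod.fst).Nodup := by
    have := PySem.Dict.nodup_keys_counter array
    simpa [PySem.Dict.keys] using this
  rw [hw4_sorted2_eq_sorted _ hndk]
  -- both sides equal the run-length list of the sorted input
  apply PySem.List.sorted_eq_of_perm_of_pairwise_lt
  · -- Perm: hw4Runs s ~ counter items
    rw [hw4Runs_spec s hspw, hitems]
    have hcnt : (fun k => (k, ((s.count k : Nat) : Int)))
        = (fun k : Int => (k, ((array.count k : Nat) : Int))) := by
      funext k; simp [hsperm.count_eq]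
    rw [hcnt]
    apply List.Perm.map
    exact (List.perm_ext_iff_of_nodup (PySem.Set.nodup_ofList s) (PySem.Set.nodup_ofList array)).2
      (fun a => by simp [PySem.Set.mem_ofList, hsperm.mem_iff])
  · -- Pairwise strictly increasing first components
    rw [hw4Runs_spec s hspw]
    rw [List.pairwise_map]
    have hle : (PySem.Set.ofList s).Pairwise (· ≤ ·) := List.Pairwise.sublist (hw4_ofList_sublist s) hspw
    have hne : (PySem.Set.ofList s).Pairwise (· ≠ ·) := PySem.Set.nodup_ofList s
    exact (hle.and hne).imp (fun ⟨h1, h2⟩ => lt_of_le_of_ne h1 h2)
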